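-- pv_equiv track=rewrite | github.com/AdamZhouSE/pythonHomework | Code/CodeRecords/2615/60788/238252.py | f
-- ===== SOURCE A (Python) =====
-- def f(str):
--     s=list(str)
--     s.pop(0)
--     t=list(str)
--     t.pop()
--
--     if ord(t[0])<=ord(s[0]):
--         return False
--     for i in range(0,len(s)-1):
--         if ord(t[i])-ord(s[i])!=ord(t[i+1])-ord(s[i+1]):
--             return False
--     return True
-- ===== SOURCE B (Python) =====
-- def f(str):
--     c0 = ord(str[0])
--     d = c0 - ord(str[1])
--     if d <= 0:
--         return False
--     return [ord(c) for c in str] == [c0 - i * d for i in range(len(str))]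
-- ===== Notes on version B (the rewrite author's own statement) =====
-- stated objective: alternative
-- what changed: B replaces A's neighbour-to-neighbour difference scan over two shifted copies by a predict-then-compare decomposition: it derives the common step d from the first two characters, reconstructs the expected arithmetic code sequence c0 - i*d in closed form, and compares it wholesale to the actual codes.
import Mathlib
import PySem

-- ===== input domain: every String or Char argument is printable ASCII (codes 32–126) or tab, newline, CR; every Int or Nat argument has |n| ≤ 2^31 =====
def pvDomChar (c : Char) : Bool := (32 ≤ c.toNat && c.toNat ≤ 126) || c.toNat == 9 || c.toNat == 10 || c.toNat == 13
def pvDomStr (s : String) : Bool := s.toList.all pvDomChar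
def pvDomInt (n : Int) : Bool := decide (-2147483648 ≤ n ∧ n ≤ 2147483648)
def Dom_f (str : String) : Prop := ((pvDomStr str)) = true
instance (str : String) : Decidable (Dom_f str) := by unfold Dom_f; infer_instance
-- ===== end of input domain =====

-- B replaces A's neighbour-to-neighbour difference scan by a closed-form reconstruction:
-- from the first two characters it predicts the whole arithmetic code sequence c0 - i*d
-- and compares it wholesale to the actual codes (objective: alternative decomposition).

-- ===== PORT A =====
def f (str : String) : Bool :=
  match PySem.List.pop? (str.toList) 0 with            -- s=list(str); s.pop(0)
  | none => false                                      -- IndexError (excluded by Pre_)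
  | some (_, s) =>
    match PySem.List.pop? (str.toList) (-1) with       -- t=list(str); t.pop()
    | none => false                                    -- IndexError (excluded by Pre_)
    | some (_, t) =>
      if ((PySem.List.pyGetD t 0 default).toNat : Int) ≤ ((PySem.List.pyGetD s 0 default).toNat : Int)
      then false
      else
        (PySem.List.pyRange 0 ((s.length : Int) - 1) 1).all (fun i =>
          decide (((PySem.List.pyGetD t i default).toNat : Int) - ((PySem.List.pyGetD s i default).toNat : Int)
                = ((PySem.List.pyGetD t (i+1) default).toNat : Int) - ((PySem.List.pyGetD s (i+1) default).toNat : Int)))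

-- ===== PORT B =====
def f_alt (str : String) : Bool :=
  let l := str.toList
  let c0 : Int := ((PySem.List.pyGetD l 0 default).toNat : Int)        -- ord(str[0]); raises on len 0 (excluded by Pre_)
  let d : Int := c0 - ((PySem.List.pyGetD l 1 default).toNat : Int)    -- ord(str[1]); raises on len 1 (excluded by Pre_)
  if d ≤ 0 then false
  else (l.map (fun c => ((c.toNat : Int)))) ==
       ((PySem.List.pyRange 0 (l.length : Int) 1).map (fun i => c0 - i * d))

-- ===== PRECONDITION & SPEC =====
-- Pre_ excludes strings of length < 2, on which both Pythons raise IndexError.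
def Pre_f (str : String) : Prop := 2 ≤ str.toList.length
instance (str : String) : Decidable (Pre_f str) := by unfold Pre_f; infer_instance
def pvWitness_f : String := "ba"

def Spec_f (str : String) (out : Bool) : Prop := out = f_alt str
instance (str : String) (out : Bool) : Decidable (Spec_f str out) := by unfold Spec_f; infer_instance

-- ===== CLAIM (what is proved, stated in full; the proofs are below) =====
def Claim_equal_f : Prop := ∀ (str : String), Dom_f str → Pre_f str → Spec_f str (f str)

-- ===== LEMMAS AND PROOFS =====

lemma chainNat (D : Nat → Int) (m : Nat) :
    (∀ k < m, D k = D (k+1)) ↔ (∀ k < m+1, D k = D 0) := by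
  constructor
  · intro h k _
    induction k with
    | zero => rfl
    | succ k ih =>
      have hk : k < m := by omega
      rw [← h k hk]
      exact ih (by omega)
  · intro h k hk
    rw [h k (by omega), h (k+1) (by omega)]

/-- A's neighbour-chain condition equals B's closed-form arithmetic-sequence condition. -/
lemma apIff (g : Nat → Int) (m : Nat) :
    (∀ k < m, g k - g (k+1) = g (k+1) - g (k+2)) ↔
    (∀ k < m+2, g k = g 0 - k * (g 0 - g 1)) := by
  constructor
  · intro h
    have hchain := (chainNat (fun k => g k - g (k+1)) m).mp h
    intro k hk
    induction k with
    | zero => simp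
    | succ k ih =>
      have hk' : k < m + 1 := by omega
      have hD := hchain k hk'
      simp only at hD
      have := ih (by omega)
      push_cast at this ⊢
      linarith
  · intro h k hk
    have h0 := h k (by omega)
    have h1 := h (k+1) (by omega)
    have h2 := h (k+2) (by omega)
    rw [h0, h1, h2]
    push_cast
    ring

lemma f_eq_alt : ∀ (str : String), Pre_f str → f str = f_alt str := by
  intro str hpre
  unfold Pre_f at hpre
  unfold f f_alt
  generalize str.toList = l at *
  match l, hpre with
  | a :: b :: r, _ =>
  have hne : (a :: b :: r) ≠ [] := by simp
  have hpop : PySem.List.pop? (a::b::r) (-1)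
      = some ((a::b::r).getLast hne, (a::b::r).dropLast) := by
    conv_lhs => rw [← List.dropLast_append_getLast hne]
    rw [PySem.List.pop?_last]
  rw [PySem.List.pop?_zero_cons, hpop]
  dsimp only
  rw [show (a::b::r).dropLast = a :: (b::r).dropLast from rfl]
  rw [PySem.List.pyGetD_zero_cons, PySem.List.pyGetD_zero_cons, PySem.List.pyGetD_zero_cons]
  have hget1 : PySem.List.pyGetD (a :: b :: r) 1 default = b := by
    rw [PySem.List.pyGetD_eq_getElem _ _ (by norm_num) (by simp)]
    simp
  rw [hget1]
  by_cases hg : ((a.toNat : Int)) ≤ ((b.toNat : Int))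
  · rw [if_pos hg, if_pos (by omega)]
  · rw [if_neg hg, if_neg (by omega), Bool.eq_iff_iff]
    set l : List Char := a :: b :: r with hl
    set g : Nat → Int := fun k => ((l.getD k default).toNat : Int) with hg'
    have hsl : (((b :: r).length : Int)) - 1 = ((r.length : Nat) : Int) := by
      simp only [List.length_cons]; push_cast; omega
    rw [hsl]
    have factT : ∀ x : Int, 0 ≤ x → x < (r.length : Int) + 1 →
        PySem.List.pyGetD (a :: (b :: r).dropLast) x default = l.getD x.toNat default := by
      intro x h0 h1
      rw [show x = ((x.toNat : Nat) : Int) from by omega, PySem.List.pyGetD_natCast]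
      simp only [Int.toNat_natCast]
      rw [show (a :: (b :: r).dropLast) = l.dropLast from rfl]
      rw [List.getD_eq_getElem?_getD, List.getD_eq_getElem?_getD, List.getElem?_dropLast]
      rw [if_pos (by simp [hl]; omega)]
    have factS : ∀ x : Int, 0 ≤ x →
        PySem.List.pyGetD (b :: r) x default = l.getD (x.toNat + 1) default := by
      intro x h0
      rw [show x = ((x.toNat : Nat) : Int) from by omega, PySem.List.pyGetD_natCast]
      simp only [Int.toNat_natCast]
      rw [show (b :: r) = l.tail from rfl]
      rw [List.getD_eq_getElem?_getD, List.getD_eq_getElem?_getD, List.getElem?_tail]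
    have hplus : ∀ x : Int, 0 ≤ x → (x + 1).toNat = x.toNat + 1 := by intro x h0; omega
    have hg0 : g 0 = ((a.toNat : Int)) := by simp [hg', hl, List.getD]
    have hg1 : g 1 = ((b.toNat : Int)) := by simp [hg', hl, List.getD]
    -- A's loop ↔ the Nat-indexed neighbour-chain condition
    have hA : ((PySem.List.pyRange 0 ((r.length : Nat) : Int) 1).all (fun i =>
          decide (((PySem.List.pyGetD (a :: (b :: r).dropLast) i default).toNat : Int)
                  - ((PySem.List.pyGetD (b :: r) i default).toNat : Int)
                = ((PySem.List.pyGetD (a :: (b :: r).dropLast) (i+1) default).toNat : Int)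
                  - ((PySem.List.pyGetD (b :: r) (i+1) default).toNat : Int))) = true)
        ↔ (∀ k < r.length, g k - g (k+1) = g (k+1) - g (k+2)) := by
      simp only [List.all_eq_true, PySem.List.mem_pyRange_one, decide_eq_true_iff]
      constructor
      · intro h k hk
        have hc := h (k : Int) ⟨by omega, by omega⟩
        rw [factT _ (by omega) (by omega), factS _ (by omega),
            factT _ (by omega) (by omega), factS _ (by omega),
            hplus _ (by omega), Int.toNat_natCast] at hc
        exact hc
      · intro h x hx
        obtain ⟨hx0, hx1⟩ := hx
        have hc := h x.toNat (by omega)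
        rw [factT _ (by omega) (by omega), factS _ (by omega),
            factT _ (by omega) (by omega), factS _ (by omega),
            hplus _ (by omega)]
        exact hc
    -- B's list comparison ↔ the closed-form condition
    have hB : ((l.map (fun c => ((c.toNat : Int)))) ==
          ((PySem.List.pyRange 0 ((l.length : Nat) : Int) 1).map
            (fun i => ((a.toNat : Int)) - i * (((a.toNat : Int)) - ((b.toNat : Int))))) ) = true
        ↔ (∀ k < r.length + 2, g k = g 0 - k * (g 0 - g 1)) := by
      rw [beq_iff_eq, hg0, hg1]
      have hlen : l.length = r.length + 2 := by simp [hl]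
      constructor
      · intro h k hk
        have := congrArg (fun xs => xs[k]?) h
        simp only [List.getElem?_map, PySem.List.getElem?_pyRange_one] at this
        rw [if_pos (show k < ((l.length : Int) - 0).toNat by
              rw [Int.sub_zero, Int.toNat_natCast]; omega)] at this
        rw [List.getElem?_eq_getElem (by omega)] at this
        simp only [Option.map_some] at this
        have heq := Option.some.inj this
        simp only [hg']
        rw [List.getD_eq_getElem?_getD, List.getElem?_eq_getElem (by omega)]
        simp only [Option.getD_some]
        rw [heq]
        ring
      · intro h
        apply List.ext_getElem?
        intro k
        simp only [List.getElem?_map, PySem.List.getElem?_pyRange_one]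
        by_cases hk : k < l.length
        · rw [if_pos (show k < ((l.length : Int) - 0).toNat by
                rw [Int.sub_zero, Int.toNat_natCast]; exact hk)]
          rw [List.getElem?_eq_getElem hk]
          simp only [Option.map_some, Option.some.injEq]
          have hgoal := h k (by omega)
          simp only [hg'] at hgoal
          rw [List.getD_eq_getElem?_getD, List.getElem?_eq_getElem hk] at hgoal
          simp only [Option.getD_some] at hgoal
          rw [hgoal]
          ring
        · rw [if_neg (show ¬ k < ((l.length : Int) - 0).toNat by
                rw [Int.sub_zero, Int.toNat_natCast]; exact hk)]
          rw [List.getElem?_eq_none (by omega)]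
          simp
    rw [hA, hB]
    exact apIff g r.length

-- ===== VERDICT (by name: the statement is the Claim_ definition above) =====
theorem f_spec : Claim_equal_f := by
  intro str _ hpre
  unfold Spec_f
  exact f_eq_alt str hpre
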